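-- pv_equiv track=rewrite | github.com/EG0RIAN/EGE | school/2412/01.py | foo
-- ===== SOURCE A (Python) =====
-- def foo(x, h):
--     if h == 3 and x >= 62:
--         return True
--     elif h == 3 and x < 62:
--         return False
--     elif h < 3 and x >= 62:
--         return False
--     else:
--         if h % 2 == 0:
--             return foo(x + 1, h + 1) + foo(x + 4, h + 1) + foo(x*5, h + 1)
--         else:
--             return foo(x + 1, h + 1) + foo(x + 4, h + 1) + foo(x*5, h + 1)
-- ===== SOURCE B (Python) =====
-- def foo(x, h):
--     if h == 3:
--         return x >= 62
--     if x >= 62: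
--         return False
--     cur = [x]
--     level = h
--     while level != 3:
--         nxt = []
--         for v in cur:
--             for w in (v + 1, v + 4, v * 5):
--                 nxt.append(w)
--         level += 1
--         if level != 3:
--             cur = [w for w in nxt if w < 62]
--         else:
--             cur = nxt
--     return sum(1 for w in cur if w >= 62)
-- ===== Notes on version B (the rewrite author's own statement) =====
-- stated objective: alternative
-- what changed: Replaces A's three-way recursion (with a redundant parity split) by an iterative level-by-level (breadth-first) list loop that generates each depth's values at once, prunes values >= 62 before depth 3, and counts the qualifying leaves at depth 3; Pre_ excludes h > 3 (A raises RecursionError) and the inputs where A returns a Python bool instead of an int (h == 3, or h < 3 with x >= 62).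
-- outside the precondition, e.g. on foo(99, -1): A returns False, B returns False; on foo(0, 3): A returns False, B returns False; on foo(70, 3): A returns True, B returns True
import Mathlib
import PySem

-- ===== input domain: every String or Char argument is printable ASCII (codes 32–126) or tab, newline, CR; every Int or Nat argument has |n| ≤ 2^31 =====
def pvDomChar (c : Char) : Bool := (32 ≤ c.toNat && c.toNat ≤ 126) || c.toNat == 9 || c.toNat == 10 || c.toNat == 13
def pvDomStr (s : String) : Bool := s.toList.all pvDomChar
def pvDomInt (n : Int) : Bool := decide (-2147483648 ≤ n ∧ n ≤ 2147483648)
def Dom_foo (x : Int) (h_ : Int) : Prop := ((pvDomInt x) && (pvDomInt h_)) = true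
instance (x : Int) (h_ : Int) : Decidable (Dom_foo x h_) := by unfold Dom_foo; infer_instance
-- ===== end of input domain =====

-- B replaces A's three-way recursion by an iterative level-by-level (BFS) list loop with the
-- same pruning; objective: alternative decomposition, same cost.

-- ===== PORT A =====
-- A's recursion is transliterated with a fuel parameter (3 - h).toNat, which is exactly the
-- recursion depth on every input where A terminates (h ≤ 3); the fuel-0 fallback 0 is never
-- reached under Pre_foo.
def fooGo (fuel : Nat) (x : Int) (h_ : Int) : Int :=
    if h_ = 3 ∧ x ≥ 62 then 1
    else if h_ = 3 ∧ x < 62 then 0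
    else if h_ < 3 ∧ x ≥ 62 then 0
    else
      match fuel with
      | 0 => 0
      | f + 1 =>
        if PySem.Int.mod h_ 2 = 0 then
          fooGo f (x + 1) (h_ + 1) + fooGo f (x + 4) (h_ + 1) + fooGo f (x * 5) (h_ + 1)
        else
          fooGo f (x + 1) (h_ + 1) + fooGo f (x + 4) (h_ + 1) + fooGo f (x * 5) (h_ + 1)

def foo (x : Int) (h_ : Int) : Int := fooGo (3 - h_).toNat x h_

-- ===== PORT B =====
-- the while loop of Source B: advance one level at a time, pruning values ≥ 62 before level 3.
-- The fuel (3 - level).toNat is exactly the number of iterations of Source B's 'while level != 3'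
-- whenever that loop terminates (level ≤ 3); for level > 3 Source B never returns.
def fooAltLoop : Nat → List Int → Int → List Int
  | 0, cur, _ => cur
  | f + 1, cur, level =>
    if level ≠ 3 then
      let nxt := cur.flatMap (fun v => [v + 1, v + 4, v * 5])
      if level + 1 ≠ 3 then fooAltLoop f (nxt.filter (fun w => w < 62)) (level + 1)
      else fooAltLoop f nxt (level + 1)
    else cur

def foo_alt (x : Int) (h_ : Int) : Int :=
  if h_ = 3 then (if x ≥ 62 then 1 else 0)
  else if x ≥ 62 then 0
  else ((fooAltLoop (3 - h_).toNat [x] h_).countP (fun w => w ≥ 62) : Int)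

-- ===== PRECONDITION & SPEC =====
-- Pre_ excludes h_ > 3, where Python A recurses without bound (RecursionError), and the
-- inputs h_ = 3 or (h_ < 3 with x ≥ 62) where A returns a Python bool (True/False) instead
-- of an int, a value outside the declared return type.
def Pre_foo (x : Int) (h_ : Int) : Prop := h_ < 3 ∧ x < 62
instance (x : Int) (h_ : Int) : Decidable (Pre_foo x h_) := by unfold Pre_foo; infer_instance
def pvWitness_foo : Int × Int := (0, 0)

def Spec_foo (x : Int) (h_ : Int) (out : Int) : Prop := out = foo_alt x h_
instance (x : Int) (h_ : Int) (out : Int) : Decidable (Spec_foo x h_ out) := by unfold Spec_foo; infer_instance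

-- ===== CLAIM (what is proved, stated in full; the proofs are below) =====
def Claim_equal_foo : Prop := ∀ (x : Int) (h_ : Int), Dom_foo x h_ → Pre_foo x h_ → Spec_foo x h_ (foo x h_)

-- ===== LEMMAS AND PROOFS =====

-- unfolding foo at an interior node (h < 3, x < 62): the fuel is exactly one more than the
-- children's fuel, so foo satisfies A's recurrence
lemma foo_node (x h_ : Int) (hh : h_ < 3) (hx : x < 62) :
    foo x h_ = foo (x + 1) (h_ + 1) + foo (x + 4) (h_ + 1) + foo (x * 5) (h_ + 1) := by
  have hf : (3 - h_).toNat = (3 - (h_ + 1)).toNat + 1 := by omega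
  unfold foo
  rw [hf]
  rw [fooGo]
  simp only [show ¬(h_ = 3 ∧ x ≥ 62) by omega, show ¬(h_ = 3 ∧ x < 62) by omega,
    show ¬(h_ < 3 ∧ x ≥ 62) by omega, if_false]
  split <;> rfl

lemma foo_leaf (x : Int) : foo x 3 = if x ≥ 62 then 1 else 0 := by
  unfold foo fooGo
  by_cases h : x ≥ 62 <;> simp [h]

lemma foo_pruned (x h_ : Int) (hh : h_ < 3) (hx : x ≥ 62) : foo x h_ = 0 := by
  unfold foo fooGo
  split_ifs <;> first | rfl | omega

-- dropping children ≥ 62 before level 3 does not change the sum of foo-values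
lemma sum_filter_lt (l : Int) (hl : l < 3) (xs : List Int) :
    ((xs.filter (fun w => w < 62)).map (fun v => foo v l)).sum
      = (xs.map (fun v => foo v l)).sum := by
  induction xs with
  | nil => rfl
  | cons a t ih =>
    by_cases ha : a < 62
    · simp [ha, ih]
    · simp [ha, ih, foo_pruned a l hl (by omega)]

-- the loop invariant: as long as every value on a non-final level is < 62, the number of
-- values ≥ 62 the loop ends with equals the sum of foo over the current level
lemma loop_sum : ∀ (k : Nat) (level : Int) (cur : List Int),
    (3 - level).toNat = k → level ≤ 3 → (level < 3 → ∀ v ∈ cur, v < 62) →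
    ((fooAltLoop k cur level).countP (fun w => w ≥ 62) : Int)
      = (cur.map (fun v => foo v level)).sum := by
  intro k
  induction k with
  | zero =>
    intro level cur hk hle _
    have h3 : level = 3 := by omega
    subst h3
    show ((cur.countP (fun w => w ≥ 62) : Int)) = _
    induction cur with
    | nil => simp
    | cons a t ih =>
      rw [List.countP_cons, List.map_cons, List.sum_cons, foo_leaf, ← ih (by omega)]
      by_cases ha : a ≥ 62 <;> simp [ha] <;> omega
  | succ n ih =>
    intro level cur hk hle hinv
    have hl : level < 3 := by omega
    show ((if level ≠ 3 then
        let nxt := cur.flatMap (fun v => [v + 1, v + 4, v * 5])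
        if level + 1 ≠ 3 then fooAltLoop n (nxt.filter (fun w => w < 62)) (level + 1)
        else fooAltLoop n nxt (level + 1)
      else cur).countP (fun w => w ≥ 62) : Int) = _
    simp only [if_pos (show level ≠ 3 by omega)]
    have hsum : ∀ (l : Int), l = level + 1 →
        ((cur.flatMap (fun v => [v + 1, v + 4, v * 5])).map (fun v => foo v l)).sum
          = (cur.map (fun v => foo v level)).sum := by
      intro l hlv; subst hlv
      induction cur with
      | nil => simp
      | cons a t iht =>
        have ha : a < 62 := hinv hl a (by simp)
        have ht : level < 3 → ∀ v ∈ t, v < 62 := fun _ v hv => hinv hl v (by simp [hv])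
        simp only [List.flatMap_cons, List.map_append, List.sum_append, List.map_cons,
          List.sum_cons, List.map_nil, List.sum_nil, add_zero]
        rw [iht ht, foo_node a level hl ha]
        ring
    by_cases h2 : level + 1 < 3
    · simp only [if_pos (show level + 1 ≠ 3 by omega)]
      rw [ih (level + 1) _ (by omega) (by omega)
        (fun _ v hv => by
          have := List.of_mem_filter hv
          simpa using this)]
      rw [sum_filter_lt (level + 1) h2, hsum (level + 1) rfl]
    · simp only [if_neg (show ¬ level + 1 ≠ 3 by omega)]
      rw [ih (level + 1) _ (by omega) (by omega) (fun hlt _ _ => absurd hlt h2)]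
      exact hsum (level + 1) rfl

-- ===== VERDICT (by name: the statement is the Claim_ definition above) =====
theorem foo_spec : Claim_equal_foo := by
  intro x h_ _ hpre
  obtain ⟨hl, hx⟩ := hpre
  unfold Spec_foo foo_alt
  simp only [if_neg (show h_ ≠ 3 by omega), if_neg (show ¬ x ≥ 62 by omega)]
  rw [loop_sum (3 - h_).toNat h_ [x] rfl (by omega)
    (fun _ v hv => by simp at hv; omega)]
  simp
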